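-- pv_equiv track=rewrite | github.com/Paoloc99/Lost-in-the-middle | docker-unsloth/training_regularization/evaluate_model.py | match_tokens
-- ===== SOURCE A (Python) =====
-- from collections import Counter
--
-- def match_tokens(generated_texts_list, true_texts_list):
--     tp = 0  # Veri positivi
--     fp = 0  # Falsi positivi
--     fn = 0  # Falsi negativi
--
--     # Itera su ogni coppia di tensori nella lista
--     for true_list, generated_list in zip(true_texts_list, generated_texts_list):
--         # Conta la frequenza di ciascun token nelle liste
--         true_counter = Counter(true_list)
--         generated_counter = Counter(generated_list)
--
--         # Calcola i veri positivi e i falsi negativi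
--         for token in true_counter:
--             if token in generated_counter:
--                 tp += min(true_counter[token], generated_counter[token])
--                 fn += max(0, true_counter[token] - generated_counter[token])
--             else:
--                 fn += true_counter[token]
--
--         # Calcola i falsi positivi
--         for token in generated_counter:
--             if token not in true_counter:
--                 fp += generated_counter[token]
--             elif generated_counter[token] > true_counter[token]:
--                 fp += generated_counter[token] - true_counter[token]
--
--     return tp, fp, fn
-- ===== SOURCE B (Python) =====
-- from collections import Counter
--
-- def match_tokens(generated_texts_list, true_texts_list):
--     tp = 0
--     fp = 0
--     fn = 0
--     for true_list, generated_list in zip(true_texts_list, generated_texts_list):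
--         # Greedy one-pass matching: consume generated tokens while scanning the
--         # true tokens; the per-pair matched count is the multiset intersection
--         # size, and fn/fp follow from the list lengths.
--         avail = Counter(generated_list)
--         matched = 0
--         for tok in true_list:
--             if avail[tok] > 0:
--                 avail[tok] -= 1
--                 matched += 1
--         tp += matched
--         fn += len(true_list) - matched
--         fp += len(generated_list) - matched
--     return tp, fp, fn
-- ===== Notes on version B (the rewrite author's own statement) =====
-- stated objective: simpler
-- what changed: Replaces the two per-pair key-iteration loops over both Counters (with min/max and membership branches) by a single greedy pass over the true tokens consuming from a Counter of the generated tokens; fn and fp are then derived from the list lengths minus the matched count.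
import Mathlib
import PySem

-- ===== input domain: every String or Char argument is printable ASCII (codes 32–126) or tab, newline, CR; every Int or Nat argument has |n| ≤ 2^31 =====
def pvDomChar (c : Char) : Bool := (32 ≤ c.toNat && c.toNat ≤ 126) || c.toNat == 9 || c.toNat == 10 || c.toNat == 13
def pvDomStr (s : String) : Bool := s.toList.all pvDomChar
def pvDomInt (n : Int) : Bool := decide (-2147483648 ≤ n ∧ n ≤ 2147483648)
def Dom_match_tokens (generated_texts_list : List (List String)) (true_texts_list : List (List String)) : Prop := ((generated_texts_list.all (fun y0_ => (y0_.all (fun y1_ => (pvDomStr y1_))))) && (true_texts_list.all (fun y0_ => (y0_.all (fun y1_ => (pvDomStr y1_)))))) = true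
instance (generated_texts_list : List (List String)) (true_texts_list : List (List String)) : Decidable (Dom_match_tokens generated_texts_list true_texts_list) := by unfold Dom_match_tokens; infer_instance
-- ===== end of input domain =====

-- B replaces A's two per-pair Counter key-iteration loops (min/max plus membership branches)
-- by one greedy pass over the true tokens consuming from a Counter of the generated tokens,
-- deriving fn and fp from the list lengths; objective: simpler.

-- ===== PORT A =====
def match_tokens (generated_texts_list : List (List String)) (true_texts_list : List (List String)) : Int × Int × Int :=
  (true_texts_list.zip generated_texts_list).foldl
    (fun (s : Int × Int × Int) (p : List String × List String) =>
      let true_list := p.1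
      let generated_list := p.2
      let true_counter := PySem.Dict.counter true_list
      let generated_counter := PySem.Dict.counter generated_list
      -- for token in true_counter: tp/fn updates
      let tpfn := true_counter.keys.foldl
        (fun (a : Int × Int) (token : String) =>
          if generated_counter.contains token then
            (a.1 + min (true_counter.getD token 0) (generated_counter.getD token 0),
             a.2 + max 0 (true_counter.getD token 0 - generated_counter.getD token 0))
          else
            (a.1, a.2 + true_counter.getD token 0))
        (s.1, s.2.2)
      -- for token in generated_counter: fp updates
      let fp := generated_counter.keys.foldl
        (fun (f : Int) (token : String) =>
          if !true_counter.contains token then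
            f + generated_counter.getD token 0
          else if generated_counter.getD token 0 > true_counter.getD token 0 then
            f + (generated_counter.getD token 0 - true_counter.getD token 0)
          else f)
        s.2.1
      (tpfn.1, fp, tpfn.2))
    (0, 0, 0)

-- ===== PORT B =====
def match_tokens_alt (generated_texts_list : List (List String)) (true_texts_list : List (List String)) : Int × Int × Int :=
  (true_texts_list.zip generated_texts_list).foldl
    (fun (s : Int × Int × Int) (p : List String × List String) =>
      let true_list := p.1
      let generated_list := p.2
      -- greedy one-pass matching over the true tokens, consuming from Counter(generated_list)
      let r := true_list.foldl
        (fun (st : PySem.Dict String Int × Int) (tok : String) =>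
          if st.1.getD tok 0 > 0 then (st.1.insert tok (st.1.getD tok 0 - 1), st.2 + 1) else st)
        (PySem.Dict.counter generated_list, 0)
      (s.1 + r.2,
       s.2.1 + ((generated_list.length : Int) - r.2),
       s.2.2 + ((true_list.length : Int) - r.2)))
    (0, 0, 0)

-- ===== PRECONDITION & SPEC =====
def Spec_match_tokens (generated_texts_list : List (List String)) (true_texts_list : List (List String)) (out : Int × Int × Int) : Prop := out = match_tokens_alt generated_texts_list true_texts_list
instance (generated_texts_list : List (List String)) (true_texts_list : List (List String)) (out : Int × Int × Int) : Decidable (Spec_match_tokens generated_texts_list true_texts_list out) := by unfold Spec_match_tokens; infer_instance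

-- ===== CLAIM (what is proved, stated in full; the proofs are below) =====
def Claim_equal_match_tokens : Prop := ∀ (generated_texts_list : List (List String)) (true_texts_list : List (List String)), Dom_match_tokens generated_texts_list true_texts_list → Spec_match_tokens generated_texts_list true_texts_list (match_tokens generated_texts_list true_texts_list)

-- ===== LEMMAS AND PROOFS =====

-- B's greedy fold over the true tokens counts the multiset-intersection size.
lemma greedy_eq (t : List String) : ∀ (m : Multiset String) (d : PySem.Dict String Int) (c : Int),
    (∀ k, d.getD k 0 = (m.count k : Int)) →
    (t.foldl
      (fun (st : PySem.Dict String Int × Int) (tok : String) =>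
        if st.1.getD tok 0 > 0 then (st.1.insert tok (st.1.getD tok 0 - 1), st.2 + 1) else st)
      (d, c)).2
    = c + ((((t : Multiset String)) ∩ m).card : Int) := by
  induction t with
  | nil => intro m d c h; simp
  | cons x xs ih =>
    intro m d c h
    simp only [List.foldl_cons]
    by_cases hx : d.getD x 0 > 0
    · have hmem : x ∈ m := by
        rw [h x] at hx
        exact Multiset.count_pos.mp (by exact_mod_cast hx)
      rw [if_pos hx]
      have h' : ∀ k, (d.insert x (d.getD x 0 - 1)).getD k 0 = ((m.erase x).count k : Int) := by
        intro k
        rw [PySem.Dict.getD_insert]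
        by_cases hk : k = x
        · rw [if_pos hk, hk, h x, Multiset.count_erase_self]
          have h1 : 1 ≤ m.count x := Multiset.one_le_count_iff_mem.mpr hmem
          omega
        · rw [if_neg hk, h k, Multiset.count_erase_of_ne hk]
      rw [ih (m.erase x) _ (c + 1) h']
      have : ((x :: xs : List String) : Multiset String) ∩ m = x ::ₘ ((xs : Multiset String) ∩ m.erase x) := by
        rw [← Multiset.cons_coe]
        exact Multiset.cons_inter_of_pos _ hmem
      rw [this, Multiset.card_cons]
      push_cast; ring
    · have hmem : x ∉ m := by
        rw [h x] at hx
        intro hc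
        exact hx (by exact_mod_cast Multiset.count_pos.mpr hc)
      rw [if_neg hx, ih m d c h]
      have : ((x :: xs : List String) : Multiset String) ∩ m = (xs : Multiset String) ∩ m := by
        rw [← Multiset.cons_coe]
        exact Multiset.cons_inter_of_neg _ hmem
      rw [this]

-- a sum of a map over the deduplicated tokens is a Finset sum over the token support
lemma dedupSum (t : List String) (f : String → Int) :
    ((PySem.Set.ofList t).map f).sum = ∑ k ∈ t.toFinset, f k := by
  rw [← PySem.List.dedup_eq_ofList, ← List.sum_toFinset f (PySem.List.nodup_dedup t)]
  congr 1
  ext x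
  simp

-- Nat form: the min-of-counts sum over t's support is the multiset-intersection size
lemma sum_min_nat (t g : List String) :
    ∑ k ∈ t.toFinset, min (t.count k) (g.count k) = (((t : Multiset String)) ∩ g).card := by
  have hcnt : ∀ k, (((t : Multiset String)) ∩ g).count k = min (t.count k) (g.count k) := by
    intro k; rw [Multiset.count_inter]; simp
  have hsub : ((t : Multiset String) ∩ g).toFinset ⊆ t.toFinset := by
    intro x hx
    simp only [Multiset.mem_toFinset, Multiset.mem_inter] at hx
    simpa [List.mem_toFinset] using hx.1
  calc ∑ k ∈ t.toFinset, min (t.count k) (g.count k)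
      = ∑ k ∈ t.toFinset, ((t : Multiset String) ∩ g).count k :=
        Finset.sum_congr rfl (fun k _ => (hcnt k).symm)
    _ = ∑ k ∈ ((t : Multiset String) ∩ g).toFinset, ((t : Multiset String) ∩ g).count k :=
        (Finset.sum_subset hsub (fun x _ hx => by
          rw [Multiset.count_eq_zero]
          simpa [Multiset.mem_toFinset] using hx)).symm
    _ = (((t : Multiset String)) ∩ g).card := Multiset.toFinset_sum_count_eq _

lemma sum_count_nat (t : List String) :
    ∑ k ∈ t.toFinset, t.count k = t.length := by
  simpa using Multiset.toFinset_sum_count_eq (t : Multiset String)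

-- Int forms used by the per-pair proof
lemma L_min (t g : List String) :
    ((PySem.Set.ofList t).map (fun k => min ((t.count k : Int)) ((g.count k : Int)))).sum
      = ((((t : Multiset String)) ∩ g).card : Int) := by
  rw [dedupSum]
  rw [← sum_min_nat t g]
  push_cast
  rfl

lemma L_sub (t g : List String) :
    ((PySem.Set.ofList t).map (fun k => (t.count k : Int) - min ((t.count k : Int)) ((g.count k : Int)))).sum
      = (t.length : Int) - ((((t : Multiset String)) ∩ g).card : Int) := by
  rw [dedupSum, Finset.sum_sub_distrib]
  rw [← sum_min_nat t g, ← sum_count_nat t]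
  push_cast
  rfl

lemma int_max_sub (a b : Int) : max 0 (a - b) = a - min a b := by
  rcases le_total a b with h | h
  · rw [min_eq_left h, sub_self, max_eq_left (sub_nonpos.mpr h)]
  · rw [min_eq_right h, max_eq_right (sub_nonneg.mpr h)]

-- ===== VERDICT (by name: the statement is the Claim_ definition above) =====
theorem match_tokens_spec : Claim_equal_match_tokens := by
  intro generated_texts_list true_texts_list _
  unfold Spec_match_tokens match_tokens match_tokens_alt
  apply List.foldl_ext
  intro s p hp
  obtain ⟨t, g⟩ := p
  -- B side: evaluate the greedy fold
  have hB := greedy_eq t (g : Multiset String) (PySem.Dict.counter g) 0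
    (fun k => by simp [PySem.Dict.getD_counter])
  -- A side: normalize the counter lookups, split the two-accumulator loop, sum the maps
  have hstep1 : (fun (a : Int × Int) (token : String) =>
      if (PySem.Dict.counter g).contains token then
        (a.1 + min ((PySem.Dict.counter t).getD token 0) ((PySem.Dict.counter g).getD token 0),
         a.2 + max 0 ((PySem.Dict.counter t).getD token 0 - (PySem.Dict.counter g).getD token 0))
      else
        (a.1, a.2 + (PySem.Dict.counter t).getD token 0))
      = fun (a : Int × Int) (token : String) =>
        (a.1 + min ((t.count token : Int)) ((g.count token : Int)),
         a.2 + ((t.count token : Int) - min ((t.count token : Int)) ((g.count token : Int)))) := by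
    funext a token
    by_cases hk : token ∈ g
    · rw [if_pos (by simp [PySem.Dict.contains_counter, hk])]
      simp only [PySem.Dict.getD_counter]
      rw [int_max_sub]
    · rw [if_neg (by simp [PySem.Dict.contains_counter, hk])]
      simp only [PySem.Dict.getD_counter, List.count_eq_zero_of_not_mem hk, Nat.cast_zero]
      rw [min_eq_right (Int.natCast_nonneg _)]
      simp
  have hstep2 : (fun (f : Int) (token : String) =>
      if !(PySem.Dict.counter t).contains token then
        f + (PySem.Dict.counter g).getD token 0
      else if (PySem.Dict.counter g).getD token 0 > (PySem.Dict.counter t).getD token 0 then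
        f + ((PySem.Dict.counter g).getD token 0 - (PySem.Dict.counter t).getD token 0)
      else f)
      = fun (f : Int) (token : String) =>
        f + ((g.count token : Int) - min ((g.count token : Int)) ((t.count token : Int))) := by
    funext f token
    by_cases hk : token ∈ t
    · rw [if_neg (by simp [PySem.Dict.contains_counter, hk])]
      simp only [PySem.Dict.getD_counter]
      by_cases hgt : (g.count token : Int) > (t.count token : Int)
      · rw [if_pos hgt, min_eq_right (le_of_lt hgt)]
      · rw [if_neg hgt, min_eq_left (not_lt.mp hgt)]
        simp
    · rw [if_pos (by simp [PySem.Dict.contains_counter, hk])]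
      simp only [PySem.Dict.getD_counter, List.count_eq_zero_of_not_mem hk, Nat.cast_zero]
      rw [min_eq_right (Int.natCast_nonneg _)]
      simp
  show _ = (s.1 + _, s.2.1 + _, s.2.2 + _)
  rw [hB]
  simp only [PySem.Dict.keys_counter, hstep1, hstep2]
  rw [PySem.List.foldl_prod_mk
        (f := fun (acc : Int) (token : String) => acc + min ((t.count token : Int)) ((g.count token : Int)))
        (g := fun (acc : Int) (token : String) =>
          acc + ((t.count token : Int) - min ((t.count token : Int)) ((g.count token : Int))))]
  rw [PySem.List.foldl_add, PySem.List.foldl_add, PySem.List.foldl_add]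
  rw [L_min t g, L_sub t g, L_sub g t]
  have hcomm : ((g : Multiset String) ∩ t).card = ((t : Multiset String) ∩ g).card := by
    rw [Multiset.inter_comm]
  rw [hcomm]
  simp only [zero_add]
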